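-- pv_equiv track=rewrite | github.com/xtemur/risk-tool | src/features/feature_engineer.py | _calculate_consecutive
-- ===== SOURCE A (Python) =====
-- def _calculate_consecutive(series):
--     """Helper function to calculate consecutive streaks"""
--     consecutive = []
--     current_streak = 0
--
--     for value in series:
--         if value == 1:
--             current_streak += 1
--         else:
--             current_streak = 0
--         consecutive.append(current_streak)
--
--     return consecutive
-- ===== SOURCE B (Python) =====
-- from itertools import groupby
--
--
-- def _calculate_consecutive(series):
--     """Run-length decomposition: split into maximal runs of equal values,
--     then expand each run (1-run -> 1..n, other run -> n zeros)."""
--     out = []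
--     for key, grp in groupby(series):
--         n = len(list(grp))
--         if key == 1:
--             out.extend(range(1, n + 1))
--         else:
--             out.extend([0] * n)
--     return out
-- ===== Notes on version B (the rewrite author's own statement) =====
-- stated objective: alternative
-- what changed: B replaces A's single running-streak counter carried element-by-element with a run-length decomposition: itertools.groupby splits the input into maximal runs of equal values, and each run is expanded at once (1,2,...,n for a run of 1s, n zeros otherwise).
import Mathlib
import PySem

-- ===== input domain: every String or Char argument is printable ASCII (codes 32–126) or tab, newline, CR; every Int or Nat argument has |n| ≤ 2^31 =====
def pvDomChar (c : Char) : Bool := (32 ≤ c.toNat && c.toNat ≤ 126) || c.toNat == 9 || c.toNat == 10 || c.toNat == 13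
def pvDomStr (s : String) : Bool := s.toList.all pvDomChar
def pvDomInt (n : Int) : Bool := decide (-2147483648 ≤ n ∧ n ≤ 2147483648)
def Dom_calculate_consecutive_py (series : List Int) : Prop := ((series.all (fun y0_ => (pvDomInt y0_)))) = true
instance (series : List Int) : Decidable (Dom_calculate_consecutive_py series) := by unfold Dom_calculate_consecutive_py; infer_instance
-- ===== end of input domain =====

-- B changes the decomposition: run-length grouping with per-run expansion instead of A's
-- element-by-element running counter (same O(n) cost, no speed claim).

-- ===== PORT A =====
-- one pass, state = (consecutive list so far, current_streak)
def calculate_consecutive_py (series : List Int) : List Int :=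
  (series.foldl
    (fun (st : List Int × Int) value =>
      let current_streak := if value = 1 then st.2 + 1 else 0
      (st.1 ++ [current_streak], current_streak))
    ([], 0)).1

-- ===== PORT B =====
-- groupby: peel off the maximal run of the head value, expand it, recurse on the rest
def pvGroups (series : List Int) : List Int :=
  match series with
  | [] => []
  | x :: xs =>
    let grp := xs.takeWhile (· == x)
    let rest := xs.dropWhile (· == x)
    let n := grp.length + 1
    (if x = 1 then PySem.List.pyRange 1 ((n : Int) + 1) 1 else List.replicate n 0)
      ++ pvGroups rest
termination_by series.length
decreasing_by
  simp only [List.length_cons]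
  exact Nat.lt_succ_of_le (List.length_dropWhile_le _ _)

def calculate_consecutive_py_alt (series : List Int) : List Int := pvGroups series

-- ===== PRECONDITION & SPEC =====
def Spec_calculate_consecutive_py (series : List Int) (out : List Int) : Prop := out = calculate_consecutive_py_alt series
instance (series : List Int) (out : List Int) : Decidable (Spec_calculate_consecutive_py series out) := by unfold Spec_calculate_consecutive_py; infer_instance

-- ===== CLAIM (what is proved, stated in full; the proofs are below) =====
def Claim_equal_calculate_consecutive_py : Prop := ∀ (series : List Int), Dom_calculate_consecutive_py series → Spec_calculate_consecutive_py series (calculate_consecutive_py series)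

-- ===== LEMMAS AND PROOFS =====

-- A's recursion, written structurally with the incoming streak as a parameter
def pvAuxA (series : List Int) (c : Int) : List Int :=
  match series with
  | [] => []
  | v :: vs =>
    let c' := if v = 1 then c + 1 else 0
    c' :: pvAuxA vs c'

theorem pvFoldA (series : List Int) : ∀ (acc : List Int) (c : Int),
    (series.foldl
      (fun (st : List Int × Int) value =>
        let current_streak := if value = 1 then st.2 + 1 else 0
        (st.1 ++ [current_streak], current_streak))
      (acc, c)).1 = acc ++ pvAuxA series c := by
  induction series with
  | nil => intro acc c; simp [pvAuxA]
  | cons v vs ih =>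
    intro acc c
    simp only [List.foldl_cons, pvAuxA, ih]
    simp

-- the incoming streak is irrelevant when the next element is not 1 (or the list is empty)
theorem pvAuxA_reset (d : List Int) (c : Int) (h : ∀ y ∈ d.head?, y ≠ 1) :
    pvAuxA d c = pvAuxA d 0 := by
  cases d with
  | nil => rfl
  | cons v vs =>
    have hv : v ≠ 1 := h v (by simp)
    simp [pvAuxA, hv]

-- over a run of non-1s, A keeps emitting 0
theorem pvAuxA_run0 (l : List Int) (r : List Int) (h : ∀ y ∈ l, y ≠ 1) :
    pvAuxA (l ++ r) 0 = List.replicate l.length 0 ++ pvAuxA r 0 := by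
  induction l with
  | nil => simp
  | cons v vs ih =>
    have hv : v ≠ 1 := h v (by simp)
    simp only [List.cons_append, pvAuxA, hv, if_false, List.length_cons,
      List.replicate_succ]
    exact congrArg (0 :: ·) (ih (fun y hy => h y (by simp [hy])))

-- over a run of 1s, A counts up from c+1
theorem pvAuxA_run1 (l : List Int) : ∀ (r : List Int) (c : Int), (∀ y ∈ l, y = 1) →
    pvAuxA (l ++ r) c
      = (List.range l.length).map (fun i : Nat => c + 1 + (i : Int)) ++ pvAuxA r (c + l.length) := by
  induction l with
  | nil => intro r c _; simp
  | cons v vs ih =>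
    intro r c h
    have hv : v = 1 := h v (by simp)
    subst hv
    simp only [List.cons_append, pvAuxA, if_true]
    rw [ih r (c + 1) (fun y hy => h y (by simp [hy]))]
    simp only [List.length_cons]
    rw [List.range_succ_eq_map]
    simp only [List.map_cons, List.map_map, List.cons_append]
    congr 1
    · push_cast; ring
    congr 1
    · apply List.map_congr_left; intro i _; simp [Function.comp]; ring
    · congr 1; push_cast; ring

theorem pvHead_dropWhile (x : Int) (xs : List Int) :
    ∀ y ∈ (xs.dropWhile (· == x)).head?, y ≠ x := by
  cases hd : xs.dropWhile (· == x) with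
  | nil => intro y hy; simp at hy
  | cons a as =>
    intro y hy hyx
    have h2 := List.head?_dropWhile_not (p := (· == x)) (l := xs)
    rw [hd] at h2
    simp at h2 hy
    subst hy
    exact h2 hyx

theorem pvRange_shift (n : Nat) :
    PySem.List.pyRange 1 ((n : Int) + 1) 1 = (List.range n).map (fun i : Nat => 0 + 1 + (i : Int)) := by
  rw [PySem.List.pyRange_one]
  have : ((n : Int) + 1 - 1).toNat = n := by omega
  rw [this]
  apply List.map_congr_left; intro i _; omega

theorem pvAuxA_eq_groups (series : List Int) : pvAuxA series 0 = pvGroups series := by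
  induction series using pvGroups.induct with
  | case1 => simp [pvGroups, pvAuxA]
  | case2 x xs rest ih =>
    have hmem : ∀ y ∈ xs.takeWhile (· == x), y = x := by
      intro y hy
      simpa using List.mem_takeWhile_imp hy
    have hhead := pvHead_dropWhile x xs
    have hsplit : x :: xs = (x :: xs.takeWhile (· == x)) ++ xs.dropWhile (· == x) := by
      simp [List.takeWhile_append_dropWhile]
    simp only [pvGroups]
    by_cases hx : x = 1
    · subst hx
      rw [if_pos rfl, hsplit,
        pvAuxA_run1 (1 :: xs.takeWhile (· == (1 : Int))) (xs.dropWhile (· == (1 : Int))) 0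
          (by
            intro y hy
            rcases List.mem_cons.mp hy with h | h
            · exact h
            · exact hmem y h),
        pvAuxA_reset _ _ (by intro y hy h1; exact hhead y hy h1), ih, pvRange_shift]
      simp
      rfl
    · rw [if_neg hx, hsplit,
        pvAuxA_run0 (x :: xs.takeWhile (· == x)) (xs.dropWhile (· == x))
          (by
            intro y hy
            rcases List.mem_cons.mp hy with h | h
            · rw [h]; exact hx
            · rw [hmem y h]; exact hx), ih]
      simp
      rfl

-- ===== VERDICT (by name: the statement is the Claim_ definition above) =====
theorem calculate_consecutive_py_spec : Claim_equal_calculate_consecutive_py := by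
  intro series _
  unfold Spec_calculate_consecutive_py calculate_consecutive_py calculate_consecutive_py_alt
  rw [pvFoldA series [] 0]
  simpa using pvAuxA_eq_groups series
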